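-- pv_equiv track=rewrite | github.com/Nikqlay/DemoForBki-okb | GeekBrains/python_seminar_3/Task_2.py | multip_pair_numbers
-- ===== SOURCE A (Python) =====
-- def multip_pair_numbers(number):
--     result = []
--     while len(number) > 1:
--         result.append(number[0] * number[-1])
--         del number[0]
--         del number[-1]
--     if len(number) ==1:
--         result.append(number[0]**2)
--     return result
-- ===== SOURCE B (Python) =====
-- def multip_pair_numbers(number):
--     n = len(number)
--     res = [number[i] * number[n - 1 - i] for i in range(n // 2)]
--     if n % 2:
--         res.append(number[n // 2] ** 2)
--     return res
-- ===== Notes on version B (the rewrite author's own statement) =====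
-- stated objective: faster
-- what changed: B pairs elements by index in a single comprehension over range(n//2) plus an odd-middle square, instead of A's loop that repeatedly deletes the first and last element of the list (each front deletion shifts the whole list); B also leaves the input list unmutated.
import Mathlib
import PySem

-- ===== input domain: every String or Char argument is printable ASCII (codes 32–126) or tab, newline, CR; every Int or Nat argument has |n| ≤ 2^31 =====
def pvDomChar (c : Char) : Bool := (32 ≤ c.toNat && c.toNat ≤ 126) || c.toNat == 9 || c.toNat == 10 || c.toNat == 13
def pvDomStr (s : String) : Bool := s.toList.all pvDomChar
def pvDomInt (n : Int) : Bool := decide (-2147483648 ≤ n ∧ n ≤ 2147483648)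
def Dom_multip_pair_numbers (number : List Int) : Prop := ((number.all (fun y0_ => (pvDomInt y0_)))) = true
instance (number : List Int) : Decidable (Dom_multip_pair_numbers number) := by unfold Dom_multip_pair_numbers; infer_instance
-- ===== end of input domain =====

-- B replaces A's delete-front-and-back loop (quadratic: each front deletion shifts the list)
-- by a single indexed pass over range(n//2) plus an odd-middle square; equivalence is about the
-- RETURN value only: Python A empties the input list in place, B leaves it untouched.

-- ===== PORT A =====
-- while len(number) > 1: result.append(number[0]*number[-1]); del number[0]; del number[-1]
-- number[0] → headI, number[-1] → getLast (both in range since length > 1, so exact);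
-- the two deletions → number.tail.dropLast.
def pvALoop (number result : List Int) : List Int :=
  if h : 1 < number.length then
    pvALoop number.tail.dropLast
      (result ++ [number.headI * number.getLast (by cases number <;> simp_all)])
  else if number.length = 1 then result ++ [number.headI ^ 2] else result
termination_by number.length
decreasing_by simp; omega

def multip_pair_numbers (number : List Int) : List Int := pvALoop number []

-- ===== PORT B =====
-- res = [number[i] * number[n-1-i] for i in range(n//2)]; if n % 2: res.append(number[n//2]**2)
-- all indices are in range, so getD is exact here.
def multip_pair_numbers_alt (number : List Int) : List Int :=
  let n := number.length
  let res := (List.range (n / 2)).map (fun i => number.getD i 0 * number.getD (n - 1 - i) 0)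
  if n % 2 = 1 then res ++ [number.getD (n / 2) 0 ^ 2] else res

-- ===== PRECONDITION & SPEC =====
def Spec_multip_pair_numbers (number : List Int) (out : List Int) : Prop := out = multip_pair_numbers_alt number
instance (number : List Int) (out : List Int) : Decidable (Spec_multip_pair_numbers number out) := by unfold Spec_multip_pair_numbers; infer_instance

-- ===== CLAIM (what is proved, stated in full; the proofs are below) =====
def Claim_equal_multip_pair_numbers : Prop := ∀ (number : List Int), Dom_multip_pair_numbers number → Spec_multip_pair_numbers number (multip_pair_numbers number)

-- ===== LEMMAS AND PROOFS =====

theorem alt_cons_concat (x y : Int) (m : List Int) :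
    multip_pair_numbers_alt (x :: m ++ [y]) = (x * y) :: multip_pair_numbers_alt m := by
  unfold multip_pair_numbers_alt
  have hlen : (x :: m ++ [y]).length = m.length + 2 := by simp
  have hdiv : (m.length + 2) / 2 = m.length / 2 + 1 := by omega
  have hmod : (m.length + 2) % 2 = m.length % 2 := by omega
  simp only [hlen, hdiv, hmod, List.range_succ_eq_map, List.map_cons, List.map_map]
  have h0 : (x :: m ++ [y]).getD 0 0 = x := rfl
  have hlast : (x :: m ++ [y]).getD (m.length + 2 - 1 - 0) 0 = y := by
    have : m.length + 2 - 1 - 0 = m.length + 1 := by omega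
    simp [List.getD_eq_getElem?_getD]
  have hmap : ∀ i ∈ List.range (m.length / 2),
      ((fun i => (x :: m ++ [y]).getD i 0 * (x :: m ++ [y]).getD (m.length + 2 - 1 - i) 0) ∘
        (· + 1)) i = (fun i => m.getD i 0 * m.getD (m.length - 1 - i) 0) i := by
    intro i hi
    have hi' : i < m.length / 2 := List.mem_range.mp hi
    have hiL : i < m.length := by omega
    have hL : m.length + 2 - 1 - (i + 1) = (m.length - 1 - i) + 1 := by omega
    have hL2 : m.length - 1 - i < m.length := by omega
    simp only [Function.comp, hL]
    simp [List.getD_eq_getElem?_getD, List.getElem?_append_left, hiL, hL2]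
  rw [List.map_congr_left hmap]
  by_cases hodd : m.length % 2 = 1
  · have hmid : (m.length + 2) / 2 = m.length / 2 + 1 := hdiv
    have hm2 : m.length / 2 < m.length := by omega
    simp [hodd, List.getD_eq_getElem?_getD, List.getElem?_append_left, hm2]
  · simp [hodd]

theorem pvALoop_eq (number result : List Int) :
    pvALoop number result = result ++ multip_pair_numbers_alt number := by
  fun_induction pvALoop number result with
  | case1 number result h ih =>
    rcases number with _ | ⟨x, t⟩
    · simp at h
    rcases t.eq_nil_or_concat with rfl | ⟨m, y, rfl⟩
    · simp at h
    rw [ih]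
    simp [List.getLast_cons]
    exact (alt_cons_concat x y m).symm
  | case2 number result h h1 =>
    rcases number with _ | ⟨x, t⟩
    · simp at h1
    · have : t = [] := by simpa using h1
      subst this
      simp [multip_pair_numbers_alt]
  | case3 number result h h1 =>
    rcases number with _ | ⟨x, t⟩
    · simp [multip_pair_numbers_alt]
    · exfalso; simp only [List.length_cons] at h h1; omega

-- ===== VERDICT (by name: the statement is the Claim_ definition above) =====
theorem multip_pair_numbers_spec : Claim_equal_multip_pair_numbers := by
  intro number _
  unfold Spec_multip_pair_numbers multip_pair_numbers
  simpa using pvALoop_eq number []
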